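-- pv_equiv track=rewrite | github.com/Youngmook-Lim/TIL_Algorithm | 프로그래머스/1/42840. 모의고사/모의고사.py | solution
-- ===== SOURCE A (Python) =====
-- def solution(ans):
--     sol = {}
--     cnt = 0
--
--     for i in range(len(ans)):
--         check = (i % 5) + 1
--         if check == ans[i]:
--             cnt += 1
--
--     sol[1] = cnt
--     cnt = 0
--
--     second = [1,3,4,5]
--     for i in range(len(ans)):
--         if i % 2 == 0:
--             check = 2
--         else:
--             check = second[(i % 8) // 2]
--
--         if check == ans[i]:
--             cnt += 1
--
--     sol[2] = cnt
--
--     cnt = 0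
--
--     third = [3,1,2,4,5]
--     for i in range(len(ans)):
--         check = third[(i % 10) // 2]
--
--         if check == ans[i]:
--             cnt += 1
--
--     sol[3] = cnt
--
--     answer = []
--
--     maxv = max(sol.values())
--
--     for k, v in sol.items():
--         if v == maxv:
--             answer.append(k)
--
--     answer.sort()
--
--     return answer
-- ===== SOURCE B (Python) =====
-- def solution(ans):
--     patterns = ([1, 2, 3, 4, 5], [2, 1, 2, 3, 2, 4, 2, 5], [3, 3, 1, 1, 2, 2, 4, 4, 5, 5])
--     # One pass: bucket the answers into a histogram keyed by (index mod 40, value);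
--     # 40 = lcm of the three pattern periods, so each supporter's score is then a
--     # 40-term lookup sum over the histogram, without re-reading the answers.
--     hist = {}
--     for i, a in enumerate(ans):
--         key = (i % 40, a)
--         hist[key] = hist.get(key, 0) + 1
--     scores = [sum(hist.get((r, p[r % len(p)]), 0) for r in range(40)) for p in patterns]
--     best = max(scores)
--     return [k + 1 for k, s in enumerate(scores) if s == best]
-- ===== Notes on version B (the rewrite author's own statement) =====
-- stated objective: alternative
-- what changed: Replaces A's three independent index loops (one per supporter, each re-deriving the expected answer arithmetically) plus dict/append-and-sort selection by a single bucketing pass that builds a histogram keyed by (index mod 40, answer) -- 40 = lcm(5,8,10) -- after which each score is a fixed 40-term histogram-lookup sum and the winners are an ordered comprehension over the score list.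
import Mathlib
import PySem

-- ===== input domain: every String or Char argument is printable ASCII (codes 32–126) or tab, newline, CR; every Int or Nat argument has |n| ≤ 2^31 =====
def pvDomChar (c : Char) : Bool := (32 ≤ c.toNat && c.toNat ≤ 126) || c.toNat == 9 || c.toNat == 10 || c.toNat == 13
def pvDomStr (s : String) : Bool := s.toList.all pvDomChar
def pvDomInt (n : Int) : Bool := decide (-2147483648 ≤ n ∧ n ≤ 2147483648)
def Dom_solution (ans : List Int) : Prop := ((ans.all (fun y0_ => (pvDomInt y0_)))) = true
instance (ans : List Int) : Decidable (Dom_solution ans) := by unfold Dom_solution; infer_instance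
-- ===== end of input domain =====

-- B replaces A's three per-supporter index loops + dict/append-and-sort selection by one bucketing
-- pass into a histogram keyed by (index mod 40, answer) (40 = lcm of the pattern periods), a 40-term
-- histogram-lookup sum per supporter, and an ordered comprehension over the scores (objective: alternative).


-- ===== PORT A =====
def solution (ans : List Int) : List Int :=
  -- first loop: check = (i % 5) + 1
  let cnt1 : Int := (PySem.List.pyRange 0 (PySem.List.len ans) 1).foldl
    (fun cnt i =>
      let check : Int := PySem.Int.mod i 5 + 1
      if check = PySem.List.pyGetD ans i 0 then cnt + 1 else cnt) 0
  let sol1 := (PySem.Dict.empty : PySem.Dict Int Int).insert 1 cnt1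
  -- second loop
  let second : List Int := [1, 3, 4, 5]
  let cnt2 : Int := (PySem.List.pyRange 0 (PySem.List.len ans) 1).foldl
    (fun cnt i =>
      let check : Int :=
        if PySem.Int.mod i 2 = 0 then 2
        else PySem.List.pyGetD second (PySem.Int.floordiv (PySem.Int.mod i 8) 2) 0
      if check = PySem.List.pyGetD ans i 0 then cnt + 1 else cnt) 0
  let sol2 := sol1.insert 2 cnt2
  -- third loop
  let third : List Int := [3, 1, 2, 4, 5]
  let cnt3 : Int := (PySem.List.pyRange 0 (PySem.List.len ans) 1).foldl
    (fun cnt i =>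
      let check : Int := PySem.List.pyGetD third (PySem.Int.floordiv (PySem.Int.mod i 10) 2) 0
      if check = PySem.List.pyGetD ans i 0 then cnt + 1 else cnt) 0
  let sol3 := sol2.insert 3 cnt3
  -- maxv = max(sol.values())  (values list has length 3, so max never raises)
  let maxv : Int := (PySem.List.max? sol3.values (fun v => v)).getD 0
  -- collect keys with value = maxv, then sort
  let answer : List Int := sol3.items.foldl
    (fun acc kv => if kv.2 = maxv then acc ++ [kv.1] else acc) []
  PySem.List.sorted answer (fun x => x) false

-- ===== PORT B =====
-- hist[key] = hist.get(key, 0) + 1 over enumerate(ans), key = (i % 40, a)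
def pvHist (ans : List Int) : PySem.Dict (Int × Int) Int :=
  (PySem.List.enumerate ans).foldl
    (fun d q =>
      let key : Int × Int := (PySem.Int.mod q.1 40, q.2)
      d.insert key (d.getD key 0 + 1))
    PySem.Dict.empty

-- sum(hist.get((r, p[r % len(p)]), 0) for r in range(40))
def pvScore (hist : PySem.Dict (Int × Int) Int) (p : List Int) : Int :=
  ((PySem.List.pyRange 0 40 1).map
    (fun r => hist.getD (r, PySem.List.pyGetD p (PySem.Int.mod r (PySem.List.len p)) 0) 0)).sum

def solution_alt (ans : List Int) : List Int :=
  let patterns : List (List Int) :=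
    [[1, 2, 3, 4, 5], [2, 1, 2, 3, 2, 4, 2, 5], [3, 3, 1, 1, 2, 2, 4, 4, 5, 5]]
  let hist := pvHist ans
  let scores := patterns.map (fun p => pvScore hist p)
  let best : Int := (PySem.List.max? scores (fun v => v)).getD 0
  (PySem.List.enumerate scores).filterMap
    (fun q => if q.2 = best then some (q.1 + 1) else none)

-- ===== PRECONDITION & SPEC =====
def Spec_solution (ans : List Int) (out : List Int) : Prop := out = solution_alt ans
instance (ans : List Int) (out : List Int) : Decidable (Spec_solution ans out) := by unfold Spec_solution; infer_instance

-- ===== CLAIM (what is proved, stated in full; the proofs are below) =====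
def Claim_equal_solution : Prop := ∀ (ans : List Int), Dom_solution ans → Spec_solution ans (solution ans)

-- ===== LEMMAS AND PROOFS =====

lemma sum_ind_zero (l : List Int) (r0 v0 : Int) (e : Int → Int) (h : r0 ∉ l) :
    (l.map (fun r => if ((r0, v0) == (r, e r)) then (1 : Int) else 0)).sum = 0 := by
  induction l with
  | nil => simp
  | cons a l ih =>
    simp only [List.map_cons, List.sum_cons,
      ih (fun hm => h (List.mem_cons_of_mem _ hm))]
    have hne : ¬ ((r0, v0) = (a, e a)) := by
      intro he
      exact h (by rw [Prod.mk.injEq] at he; rw [he.1]; exact List.mem_cons_self ..)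
    simp [beq_iff_eq, hne]

lemma sum_ind_one (l : List Int) (r0 v0 : Int) (e : Int → Int)
    (hn : l.Nodup) (hm : r0 ∈ l) :
    (l.map (fun r => if ((r0, v0) == (r, e r)) then (1 : Int) else 0)).sum =
      if e r0 == v0 then 1 else 0 := by
  induction l with
  | nil => cases hm
  | cons a l ih =>
    simp only [List.map_cons, List.sum_cons]
    rcases List.mem_cons.mp hm with rfl | hm'
    · rw [sum_ind_zero l r0 v0 e (List.Nodup.notMem hn)]
      simp only [beq_iff_eq, Prod.mk.injEq, true_and, add_zero]
      by_cases hv : v0 = e r0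
      · simp [hv]
      · simp [hv]
        exact fun hh => hv (Eq.symm hh)
    · have hne : r0 ≠ a := by
        rintro rfl; exact (List.Nodup.notMem hn) hm'
      rw [ih (List.Nodup.of_cons hn) hm']
      simp [beq_iff_eq, Prod.mk.injEq, hne]

lemma sum_count (ks : List (Int × Int)) (e : Int → Int)
    (h : ∀ q ∈ ks, q.1 ∈ PySem.List.pyRange 0 40 1) :
    ((PySem.List.pyRange 0 40 1).map (fun r => ((ks.count (r, e r) : Nat) : Int))).sum =
      ((ks.countP (fun q => e q.1 == q.2) : Nat) : Int) := by
  induction ks with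
  | nil => simp
  | cons q0 ks ih =>
    obtain ⟨r0, v0⟩ := q0
    have hmem : r0 ∈ PySem.List.pyRange 0 40 1 := h (r0, v0) (List.mem_cons_self ..)
    simp only [List.count_cons, List.countP_cons, Nat.cast_add, Nat.cast_ite,
      Nat.cast_one, Nat.cast_zero]
    rw [PySem.List.sum_map_add_int, ih (fun q hq => h q (List.mem_cons_of_mem _ hq)),
      sum_ind_one _ r0 v0 e (by decide) hmem]

lemma hist_eq_counter (ans : List Int) :
    pvHist ans = PySem.Dict.counter
      ((PySem.List.enumerate ans).map (fun q => (PySem.Int.mod q.1 40, q.2))) := by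
  rw [pvHist, ← PySem.Dict.foldl_insert_getD_add_one_eq_counter, List.foldl_map]

lemma score_to_countP (ans : List Int) (e : Int → Int) :
    ((PySem.List.pyRange 0 40 1).map (fun r => (pvHist ans).getD (r, e r) 0)).sum =
      (((PySem.List.pyRange 0 (PySem.List.len ans) 1).countP
        (fun j => e (PySem.Int.mod j 40) == PySem.List.pyGetD ans j 0) : Nat) : Int) := by
  rw [hist_eq_counter]
  simp only [PySem.Dict.getD_counter]
  rw [sum_count _ e (by
    intro q hq
    rcases List.mem_map.mp hq with ⟨p, _, rfl⟩
    exact PySem.List.mem_pyRange_one.mpr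
      ⟨PySem.Int.mod_nonneg _ (by norm_num), PySem.Int.mod_lt _ (by norm_num)⟩)]
  rw [List.countP_map, PySem.List.enumerate_eq_map_pyRange ans 0, List.countP_map]
  rfl

lemma select_eq (a b c : Int) :
    PySem.List.sorted
      (((((PySem.Dict.empty : PySem.Dict Int Int).insert 1 a).insert 2 b).insert 3 c).items.foldl
        (fun acc kv =>
          if kv.2 = (PySem.List.max? ((((PySem.Dict.empty : PySem.Dict Int Int).insert 1 a).insert 2 b).insert 3 c).values (fun v => v)).getD 0
          then acc ++ [kv.1] else acc) [])
      (fun x => x) false =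
    (PySem.List.enumerate [a, b, c]).filterMap
      (fun q => if q.2 = (PySem.List.max? [a, b, c] (fun v => v)).getD 0 then some (q.1 + 1) else none) := by
  have hv : ((((PySem.Dict.empty : PySem.Dict Int Int).insert 1 a).insert 2 b).insert 3 c).values = [a, b, c] := rfl
  have hi : ((((PySem.Dict.empty : PySem.Dict Int Int).insert 1 a).insert 2 b).insert 3 c).items = [(1, a), (2, b), (3, c)] := rfl
  have hm : (PySem.List.max? [a, b, c] (fun v => v)).getD 0 = max a (max b c) := by
    rw [show PySem.List.max? [a, b, c] (fun v => v)
          = PySem.List.max? (a :: [b, c]) (fun y => y) from rfl,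
        PySem.List.max?_id_cons]
    simp [max_assoc]
  rw [hv, hi, hm]
  have he : PySem.List.enumerate [a, b, c] = [(0, a), (1, b), (2, c)] := by
    simp [PySem.List.enumerate_cons, PySem.List.enumerate_nil]
  rw [he]
  simp only [List.foldl_cons, List.foldl_nil, List.filterMap_cons, List.filterMap_nil]
  split_ifs <;> decide

lemma chkB1 (n : Nat) :
    PySem.List.pyGetD [1, 2, 3, 4, 5] (PySem.Int.mod (PySem.Int.mod (n : Int) 40) 5) 0 =
      PySem.Int.mod (n : Int) 5 + 1 := by
  have e40 : PySem.Int.mod (n : Int) 40 = ((n % 40 : Nat) : Int) := by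
    exact_mod_cast PySem.Int.mod_natCast n 40
  have e5 : PySem.Int.mod (n : Int) 5 = (((n % 40) % 5 : Nat) : Int) := by
    rw [Nat.mod_mod_of_dvd n (by norm_num)]
    exact_mod_cast PySem.Int.mod_natCast n 5
  rw [e40, e5]
  have h : n % 40 < 40 := Nat.mod_lt _ (by norm_num)
  generalize n % 40 = r at h ⊢
  interval_cases r <;> decide

lemma cnt1_eq (ans : List Int) :
    (PySem.List.pyRange 0 (PySem.List.len ans) 1).foldl
      (fun cnt i => if PySem.Int.mod i 5 + 1 = PySem.List.pyGetD ans i 0 then cnt + 1 else cnt) 0 =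
    (((PySem.List.pyRange 0 (PySem.List.len ans) 1).countP
        (fun j => PySem.List.pyGetD [1, 2, 3, 4, 5] (PySem.Int.mod (PySem.Int.mod j 40) 5) 0
          == PySem.List.pyGetD ans j 0) : Nat) : Int) := by
  have h := PySem.List.foldl_count_if
    (fun i => decide (PySem.Int.mod i 5 + 1 = PySem.List.pyGetD ans i 0))
    (PySem.List.pyRange 0 (PySem.List.len ans) 1) 0
  simp only [decide_eq_true_eq] at h
  rw [h, zero_add]
  congr 1
  refine List.countP_congr ?_
  intro x hx
  obtain ⟨m, rfl⟩ := Int.eq_ofNat_of_zero_le (PySem.List.mem_pyRange_one.mp hx).1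
  simp only [decide_eq_true_eq, beq_iff_eq]
  rw [chkB1 m]

lemma chkB2 (n : Nat) :
    PySem.List.pyGetD [2, 1, 2, 3, 2, 4, 2, 5] (PySem.Int.mod (PySem.Int.mod (n : Int) 40) 8) 0 =
      (if PySem.Int.mod (n : Int) 2 = 0 then (2 : Int)
       else PySem.List.pyGetD [1, 3, 4, 5] (PySem.Int.floordiv (PySem.Int.mod (n : Int) 8) 2) 0) := by
  have e40 : PySem.Int.mod (n : Int) 40 = ((n % 40 : Nat) : Int) := by
    exact_mod_cast PySem.Int.mod_natCast n 40
  have e8 : PySem.Int.mod (n : Int) 8 = (((n % 40) % 8 : Nat) : Int) := by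
    rw [Nat.mod_mod_of_dvd n (by norm_num)]
    exact_mod_cast PySem.Int.mod_natCast n 8
  have e2 : PySem.Int.mod (n : Int) 2 = (((n % 40) % 2 : Nat) : Int) := by
    rw [Nat.mod_mod_of_dvd n (by norm_num)]
    exact_mod_cast PySem.Int.mod_natCast n 2
  rw [e40, e8, e2]
  have h : n % 40 < 40 := Nat.mod_lt _ (by norm_num)
  generalize n % 40 = r at h ⊢
  interval_cases r <;> decide

lemma chkB3 (n : Nat) :
    PySem.List.pyGetD ([3, 3, 1, 1, 2, 2, 4, 4, 5, 5] : List Int) (PySem.Int.mod (PySem.Int.mod (n : Int) 40) 10) 0 =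
      PySem.List.pyGetD [3, 1, 2, 4, 5] (PySem.Int.floordiv (PySem.Int.mod (n : Int) 10) 2) 0 := by
  have e40 : PySem.Int.mod (n : Int) 40 = ((n % 40 : Nat) : Int) := by
    exact_mod_cast PySem.Int.mod_natCast n 40
  have e10 : PySem.Int.mod (n : Int) 10 = (((n % 40) % 10 : Nat) : Int) := by
    rw [Nat.mod_mod_of_dvd n (by norm_num)]
    exact_mod_cast PySem.Int.mod_natCast n 10
  rw [e40, e10]
  have h : n % 40 < 40 := Nat.mod_lt _ (by norm_num)
  generalize n % 40 = r at h ⊢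
  interval_cases r <;> decide

lemma cnt2_eq (ans : List Int) :
    (PySem.List.pyRange 0 (PySem.List.len ans) 1).foldl
      (fun cnt i =>
        if (if PySem.Int.mod i 2 = 0 then (2 : Int)
            else PySem.List.pyGetD [1, 3, 4, 5] (PySem.Int.floordiv (PySem.Int.mod i 8) 2) 0)
           = PySem.List.pyGetD ans i 0 then cnt + 1 else cnt) 0 =
    (((PySem.List.pyRange 0 (PySem.List.len ans) 1).countP
        (fun j => PySem.List.pyGetD [2, 1, 2, 3, 2, 4, 2, 5] (PySem.Int.mod (PySem.Int.mod j 40) 8) 0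
          == PySem.List.pyGetD ans j 0) : Nat) : Int) := by
  have h := PySem.List.foldl_count_if
    (fun i => decide ((if PySem.Int.mod i 2 = 0 then (2 : Int)
            else PySem.List.pyGetD [1, 3, 4, 5] (PySem.Int.floordiv (PySem.Int.mod i 8) 2) 0)
           = PySem.List.pyGetD ans i 0))
    (PySem.List.pyRange 0 (PySem.List.len ans) 1) 0
  simp only [decide_eq_true_eq] at h
  rw [h, zero_add]
  congr 1
  refine List.countP_congr ?_
  intro x hx
  obtain ⟨m, rfl⟩ := Int.eq_ofNat_of_zero_le (PySem.List.mem_pyRange_one.mp hx).1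
  simp only [decide_eq_true_eq, beq_iff_eq]
  rw [chkB2 m]

lemma cnt3_eq (ans : List Int) :
    (PySem.List.pyRange 0 (PySem.List.len ans) 1).foldl
      (fun cnt i =>
        if PySem.List.pyGetD [3, 1, 2, 4, 5] (PySem.Int.floordiv (PySem.Int.mod i 10) 2) 0
           = PySem.List.pyGetD ans i 0 then cnt + 1 else cnt) 0 =
    (((PySem.List.pyRange 0 (PySem.List.len ans) 1).countP
        (fun j => PySem.List.pyGetD [3, 3, 1, 1, 2, 2, 4, 4, 5, 5] (PySem.Int.mod (PySem.Int.mod j 40) 10) 0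
          == PySem.List.pyGetD ans j 0) : Nat) : Int) := by
  have h := PySem.List.foldl_count_if
    (fun i => decide (PySem.List.pyGetD [3, 1, 2, 4, 5] (PySem.Int.floordiv (PySem.Int.mod i 10) 2) 0
           = PySem.List.pyGetD ans i 0))
    (PySem.List.pyRange 0 (PySem.List.len ans) 1) 0
  simp only [decide_eq_true_eq] at h
  rw [h, zero_add]
  congr 1
  refine List.countP_congr ?_
  intro x hx
  obtain ⟨m, rfl⟩ := Int.eq_ofNat_of_zero_le (PySem.List.mem_pyRange_one.mp hx).1
  simp only [decide_eq_true_eq, beq_iff_eq]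
  rw [chkB3 m]

-- ===== VERDICT (by name: the statement is the Claim_ definition above) =====
theorem solution_spec : Claim_equal_solution := by
  intro ans _
  show solution ans = solution_alt ans
  unfold solution solution_alt pvScore
  simp only [List.map_cons, List.map_nil]
  simp only [show PySem.List.len [(1 : Int), 2, 3, 4, 5] = 5 from rfl,
             show PySem.List.len [(2 : Int), 1, 2, 3, 2, 4, 2, 5] = 8 from rfl,
             show PySem.List.len [(3 : Int), 3, 1, 1, 2, 2, 4, 4, 5, 5] = 10 from rfl]
  rw [score_to_countP ans (fun r => PySem.List.pyGetD [1, 2, 3, 4, 5] (PySem.Int.mod r 5) 0),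
      score_to_countP ans (fun r => PySem.List.pyGetD [2, 1, 2, 3, 2, 4, 2, 5] (PySem.Int.mod r 8) 0),
      score_to_countP ans (fun r => PySem.List.pyGetD ([3, 3, 1, 1, 2, 2, 4, 4, 5, 5] : List Int) (PySem.Int.mod r 10) 0),
      cnt1_eq ans, cnt2_eq ans, cnt3_eq ans]
  exact select_eq _ _ _
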